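-- pv_equiv track=rewrite | github.com/vzeman/sssai | modules/agent/memory.py | derive_target_class
-- ===== SOURCE A (Python) =====
-- from typing import Any, Iterable
--
-- def _normalize_tech(tech: str) -> str:
--     return tech.lower().strip().replace(" ", "_")[:40]
--
-- def derive_target_class(technologies: Iterable[str]) -> str:
--     """Sort + normalize + join tech list — deterministic identifier."""
--     seen: list[str] = []
--     for t in technologies or []:
--         n = _normalize_tech(str(t))
--         if n and n not in seen:
--             seen.append(n)
--     seen.sort()
--     return "+".join(seen[:8])  # cap at 8 for sane keys
-- ===== SOURCE B (Python) =====
-- def _normalize_tech(tech: str) -> str: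
--     return tech.lower().strip().replace(" ", "_")[:40]
--
-- def derive_target_class(technologies) -> str:
--     """Sort first, then collapse adjacent duplicates in one pass."""
--     norm = [n for n in (_normalize_tech(str(t)) for t in technologies or []) if n]
--     norm.sort()
--     uniq: list[str] = []
--     prev = None
--     for n in norm:
--         if prev != n:
--             uniq.append(n)
--             prev = n
--     return "+".join(uniq[:8])
-- ===== Notes on version B (the rewrite author's own statement) =====
-- stated objective: faster
-- what changed: Replaces A's quadratic 'n not in seen' first-occurrence membership scan followed by a sort with: normalize and filter in one pass, sort the full (duplicate-containing) list, then collapse adjacent duplicates in a single prev-variable pass.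
import Mathlib
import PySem

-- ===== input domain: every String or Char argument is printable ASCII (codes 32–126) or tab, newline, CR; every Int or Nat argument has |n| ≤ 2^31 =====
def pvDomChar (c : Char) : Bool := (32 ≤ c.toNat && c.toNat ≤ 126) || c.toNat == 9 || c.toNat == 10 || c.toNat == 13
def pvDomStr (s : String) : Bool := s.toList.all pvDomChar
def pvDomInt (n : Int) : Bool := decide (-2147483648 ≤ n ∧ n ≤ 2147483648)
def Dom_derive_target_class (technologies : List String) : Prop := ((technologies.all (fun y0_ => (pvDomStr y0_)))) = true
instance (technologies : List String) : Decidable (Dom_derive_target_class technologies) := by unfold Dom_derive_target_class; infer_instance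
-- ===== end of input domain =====

-- B sorts the full normalized list first and collapses adjacent duplicates in one pass, instead of A's 'n not in seen' scan followed by a sort; same return values.

-- ===== PORT A =====
-- _normalize_tech: tech.lower().strip().replace(" ", "_")[:40]
def pvNorm (tech : String) : String :=
  PySem.Str.slice (PySem.Str.replace (PySem.Str.strip (PySem.Str.lower tech)) " " "_") none (some 40)

def derive_target_class (technologies : List String) : String :=
  let seen := technologies.foldl (fun seen t =>
    let n := pvNorm t
    if n ≠ "" ∧ ¬ (n ∈ seen) then seen ++ [n] else seen) []
  PySem.Str.join "+" (PySem.List.slice (PySem.List.sorted seen (fun x => x) false) none (some 8))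

-- ===== PORT B =====
def derive_target_class_alt (technologies : List String) : String :=
  let norm := (technologies.map (fun t => pvNorm t)).filter (fun n => n ≠ "")
  let srt := PySem.List.sorted norm (fun x => x) false
  let uniq := (srt.foldl (fun st n => if st.2 ≠ some n then (st.1 ++ [n], some n) else st)
      (([] : List String), (none : Option String))).1
  PySem.Str.join "+" (PySem.List.slice uniq none (some 8))

-- ===== PRECONDITION & SPEC =====
def Spec_derive_target_class (technologies : List String) (out : String) : Prop := out = derive_target_class_alt technologies
instance (technologies : List String) (out : String) : Decidable (Spec_derive_target_class technologies out) := by unfold Spec_derive_target_class; infer_instance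

-- ===== CLAIM (what is proved, stated in full; the proofs are below) =====
def Claim_equal_derive_target_class : Prop := ∀ (technologies : List String), Dom_derive_target_class technologies → Spec_derive_target_class technologies (derive_target_class technologies)

-- ===== LEMMAS AND PROOFS =====

-- A's loop step: skip empty, otherwise it is exactly set.add
theorem stepA_eq (seen : List String) (n : String) :
    (if n ≠ "" ∧ ¬ (n ∈ seen) then seen ++ [n] else seen)
    = if n = "" then seen else PySem.Set.add seen n := by
  by_cases he : n = ""
  · simp [he]
  · by_cases hm : n ∈ seen <;> simp [PySem.Set.add, PySem.Set.contains, he, hm]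

-- A's loop builds set(...) (first occurrences) of the non-empty normalized items
theorem foldl_A (ts : List String) (seen : List String) :
    ts.foldl (fun seen t =>
      let n := pvNorm t
      if n ≠ "" ∧ ¬ (n ∈ seen) then seen ++ [n] else seen) seen
    = ((ts.map pvNorm).filter (fun n => n ≠ "")).foldl PySem.Set.add seen := by
  induction ts generalizing seen with
  | nil => simp
  | cons t ts ih =>
    rw [List.foldl_cons, ih, List.map_cons, List.filter_cons]
    have hs := stepA_eq seen (pvNorm t)
    by_cases he : pvNorm t = ""
    · simp only [] at hs ⊢
      rw [hs, if_pos he]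
      simp [he]
    · simp only [] at hs ⊢
      rw [hs, if_neg he]
      simp [he]

-- adjacent-duplicate collapse, as a structural function
def adj : Option String → List String → List String
  | _, [] => []
  | prev, x :: xs => if prev ≠ some x then x :: adj (some x) xs else adj prev xs

theorem foldl_adj (l : List String) (acc : List String) (prev : Option String) :
    (l.foldl (fun st n => if st.2 ≠ some n then (st.1 ++ [n], some n) else st) (acc, prev)).1
    = acc ++ adj prev l := by
  induction l generalizing acc prev with
  | nil => simp [adj]
  | cons x xs ih =>
    rw [List.foldl_cons]
    show (xs.foldl (fun st n => if st.2 ≠ some n then (st.1 ++ [n], some n) else st)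
        (if ((acc, prev) : List String × Option String).2 ≠ some x
          then ((acc, prev).1 ++ [x], some x) else (acc, prev))).1 = acc ++ adj prev (x :: xs)
    by_cases h : prev = some x
    · rw [if_neg (by simp [h]), ih]
      simp only [adj]
      rw [if_neg (by simp [h])]
    · rw [if_pos (by simp [h]), ih]
      simp only [adj]
      rw [if_pos (by simp [h])]
      simp

-- on a ≤-chain whose prev bounds it below, adj keeps exactly the elements ≠ prev, strictly increasing
theorem adj_key (l : List String) (h : l.Pairwise (· ≤ ·)) (prev : Option String)
    (hprev : ∀ p, prev = some p → ∀ y ∈ l, p ≤ y) :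
    (adj prev l).Pairwise (· < ·) ∧ ∀ z, z ∈ adj prev l ↔ (z ∈ l ∧ prev ≠ some z) := by
  induction l generalizing prev with
  | nil => simp [adj]
  | cons x xs ih =>
    have hx : ∀ y ∈ xs, x ≤ y := fun y hy => (List.pairwise_cons.mp h).1 y hy
    have hxs : xs.Pairwise (· ≤ ·) := (List.pairwise_cons.mp h).2
    have hih := ih hxs (some x) (fun p hp y hy => by cases hp; exact hx y hy)
    by_cases hc : prev = some x
    · -- head equals prev: dropped
      subst hc
      have hred : adj (some x) (x :: xs) = adj (some x) xs := by simp [adj]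
      refine ⟨hred ▸ hih.1, ?_⟩
      intro z
      rw [hred, hih.2 z, List.mem_cons]
      constructor
      · rintro ⟨hz, hne⟩; exact ⟨Or.inr hz, hne⟩
      · rintro ⟨rfl | hz, hne⟩
        · exact absurd rfl hne
        · exact ⟨hz, hne⟩
    · -- head kept
      have hred : adj prev (x :: xs) = x :: adj (some x) xs := by simp [adj, hc]
      constructor
      · rw [hred]
        refine List.pairwise_cons.mpr ⟨?_, hih.1⟩
        intro y hy
        obtain ⟨hyx, hne⟩ := (hih.2 y).mp hy
        exact lt_of_le_of_ne (hx y hyx) (fun e => hne (by rw [e]))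
      · intro z
        rw [hred, List.mem_cons, List.mem_cons, hih.2 z]
        constructor
        · rintro (rfl | ⟨hz, hne⟩)
          · exact ⟨Or.inl rfl, hc⟩
          · refine ⟨Or.inr hz, fun hp => ?_⟩
            have h1 := hprev z hp x (by simp)
            have h2 := hx z hz
            exact hne (congrArg some (le_antisymm h2 h1))
        · rintro ⟨rfl | hz, _hne⟩
          · exact Or.inl rfl
          · by_cases hzx : z = x
            · exact Or.inl hzx
            · exact Or.inr ⟨hz, fun e => hzx (Option.some.inj e).symm⟩

-- the collapsed sorted list IS sorted(set(...))
theorem adj_sorted_eq (ns : List String) :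
    PySem.List.sorted (PySem.Set.ofList ns) (fun x => x) false
    = adj none (PySem.List.sorted ns (fun x => x) false) := by
  have hpair : (PySem.List.sorted ns (fun x => x) false).Pairwise (· ≤ ·) := by
    simpa using PySem.List.sorted_pairwise ns (fun x => x)
  have hkey := adj_key (PySem.List.sorted ns (fun x => x) false) hpair none
    (by intro p hp; cases hp)
  apply PySem.List.sorted_eq_of_perm_of_pairwise_lt
  · rw [List.perm_ext_iff_of_nodup]
    · intro a
      rw [hkey.2 a]
      simp [PySem.List.mem_sorted, PySem.Set.mem_ofList]
    · exact hkey.1.imp (fun h => ne_of_lt h)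
    · exact PySem.Set.nodup_ofList ns
  · exact hkey.1

-- ===== VERDICT (by name: the statement is the Claim_ definition above) =====
theorem derive_target_class_spec : Claim_equal_derive_target_class := by
  intro ts _
  unfold Spec_derive_target_class derive_target_class derive_target_class_alt
  simp only []
  rw [foldl_A, foldl_adj]
  simp only [List.nil_append]
  rw [← PySem.Set.ofList_eq_foldl, ← adj_sorted_eq]
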